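-- pv_equiv track=rewrite | github.com/BokDoong/algorithm-sql | baekjoon-practice2/simulation&implementation/17140_이차원 배열과 연산.py | calculate
-- ===== SOURCE A (Python) =====
-- def calculate(nums):
--     counts = {}
--     for num in set(nums):
--         counts[num] = nums.count(num)
--
--     # (등장 횟수, 숫자 값 순)으로 정렬
--     counts = sorted(counts.items(), key=lambda x: (x[1], x[0]))
--
--     # 결과 배열 (최대 길이 100 유지)
--     result = []
--     for num, count in counts:
--         result += [num, count]
--     return result[:100]  # 최대 100개까지만 유지
-- ===== SOURCE B (Python) =====
-- def calculate(nums):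
--     # sort once, then count by scanning consecutive runs (no hash counting)
--     pairs = []
--     run_val = 0
--     run_len = 0
--     for v in sorted(nums):
--         if run_len > 0 and v == run_val:
--             run_len += 1
--         else:
--             if run_len > 0:
--                 pairs.append((run_val, run_len))
--             run_val = v
--             run_len = 1
--     if run_len > 0:
--         pairs.append((run_val, run_len))
--     pairs.sort(key=lambda p: (p[1], p[0]))
--     result = []
--     for v, c in pairs:
--         result += [v, c]
--     return result[:100]
-- ===== Notes on version B (the rewrite author's own statement) =====
-- stated objective: faster
-- what changed: Counts are obtained by sorting the input once and measuring consecutive equal runs in a single pass, instead of scanning the whole list with nums.count for every distinct value of set(nums); the (count, value) sort and the flattening remain.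
import Mathlib
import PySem

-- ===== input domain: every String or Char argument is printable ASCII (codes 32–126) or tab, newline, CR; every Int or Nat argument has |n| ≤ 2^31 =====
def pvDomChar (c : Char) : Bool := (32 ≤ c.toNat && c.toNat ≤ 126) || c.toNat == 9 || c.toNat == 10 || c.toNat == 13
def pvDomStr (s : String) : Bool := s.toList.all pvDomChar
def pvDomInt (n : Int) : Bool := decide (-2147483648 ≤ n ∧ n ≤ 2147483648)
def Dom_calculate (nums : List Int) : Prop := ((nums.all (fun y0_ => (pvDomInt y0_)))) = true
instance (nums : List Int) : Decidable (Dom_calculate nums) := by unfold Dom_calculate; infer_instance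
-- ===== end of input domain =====

-- B replaces A's per-distinct-value `nums.count` scans (O(n·k)) by one sort and a single
-- consecutive-run-counting pass (O(n log n)); the (count, value) sort and flattening remain.

-- ===== PORT A =====
def calculate (nums : List Int) : List Int :=
  -- counts = {}; for num in set(nums): counts[num] = nums.count(num)
  let counts : PySem.Dict Int Int :=
    (PySem.Set.ofList nums).foldl
      (fun d num => d.insert num (PySem.List.count nums num)) PySem.Dict.empty
  -- counts = sorted(counts.items(), key=lambda x: (x[1], x[0]))
  let countsS := PySem.List.sorted2 counts.items (fun x => x.2) (fun x => x.1) false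
  -- result = []; for num, count in counts: result += [num, count]
  let result := countsS.foldl (fun r (p : Int × Int) => r ++ [p.1, p.2]) []
  -- return result[:100]
  PySem.List.slice result none (some 100)

-- ===== PORT B =====
-- one loop step of Source B: state = (pairs, run_val, run_len)
def bStep (acc : List (Int × Int) × Int × Int) (v : Int) : List (Int × Int) × Int × Int :=
  if acc.2.2 > 0 ∧ v = acc.2.1 then (acc.1, acc.2.1, acc.2.2 + 1)
  else ((if acc.2.2 > 0 then acc.1 ++ [(acc.2.1, acc.2.2)] else acc.1), v, 1)

def calculate_alt (nums : List Int) : List Int :=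
  -- for v in sorted(nums): … (run-length counting)
  let st := (PySem.List.sorted nums (fun x => x) false).foldl bStep ([], 0, 0)
  -- if run_len > 0: pairs.append((run_val, run_len))
  let pairs := if st.2.2 > 0 then st.1 ++ [(st.2.1, st.2.2)] else st.1
  -- pairs.sort(key=lambda p: (p[1], p[0]))
  let pairsS := PySem.List.sorted2 pairs (fun p => p.2) (fun p => p.1) false
  -- result = []; for v, c in pairs: result += [v, c]
  let result := pairsS.foldl (fun r (p : Int × Int) => r ++ [p.1, p.2]) []
  -- return result[:100]
  PySem.List.slice result none (some 100)

-- ===== PRECONDITION & SPEC =====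
def Spec_calculate (nums : List Int) (out : List Int) : Prop := out = calculate_alt nums
instance (nums : List Int) (out : List Int) : Decidable (Spec_calculate nums out) := by unfold Spec_calculate; infer_instance

-- ===== CLAIM (what is proved, stated in full; the proofs are below) =====
def Claim_equal_calculate : Prop := ∀ (nums : List Int), Dom_calculate nums → Spec_calculate nums (calculate nums)

-- ===== LEMMAS AND PROOFS =====

-- run-length encoding by leading-run splitting (proof-only helper)
def rleSpan : List Int → List (Int × Int)
  | [] => []
  | x :: t =>
      (x, 1 + ((t.takeWhile (· = x)).length : Int)) :: rleSpan (t.dropWhile (· = x))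
termination_by s => s.length
decreasing_by
  simpa [Nat.lt_succ_iff] using List.length_dropWhile_le (· = x) t

theorem rleSpan_cons (x : Int) (t : List Int) :
    rleSpan (x :: t)
      = (x, 1 + ((t.takeWhile (· = x)).length : Int)) :: rleSpan (t.dropWhile (· = x)) := by
  rw [rleSpan.eq_def]

-- B's loop, started inside a run, produces acc ++ the RLE of the remaining input
theorem foldl_bStep_eq_rleSpan (t : List Int) :
    ∀ (acc : List (Int × Int)) (v c : Int), 0 < c →
      (let st := t.foldl bStep (acc, v, c)
       if st.2.2 > 0 then st.1 ++ [(st.2.1, st.2.2)] else st.1)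
      = acc ++ (v, c + ((t.takeWhile (· = v)).length : Int)) :: rleSpan (t.dropWhile (· = v)) := by
  induction t with
  | nil =>
      intro acc v c hc
      simp [rleSpan, hc]
  | cons y t ih =>
      intro acc v c hc
      by_cases hyv : y = v
      · subst hyv
        have hb : bStep (acc, y, c) y = (acc, y, c + 1) := by
          simp [bStep, hc]
        rw [List.foldl_cons, hb, ih acc y (c + 1) (by omega)]
        simp only [List.takeWhile_cons, List.dropWhile_cons, decide_true, if_true]
        congr 3
        simp only [List.length_cons]
        push_cast
        omega
      · have hb : bStep (acc, v, c) y = (acc ++ [(v, c)], y, 1) := by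
          simp [bStep, hyv, hc]
        rw [List.foldl_cons, hb, ih (acc ++ [(v, c)]) y 1 (by omega)]
        rw [List.takeWhile_cons, List.dropWhile_cons]
        simp only [hyv, decide_false, Bool.false_eq_true, if_false, List.length_nil,
          Nat.cast_zero, add_zero, rleSpan_cons]
        simp

theorem discard_of_not_mem {x : Int} {s : List Int} (h : x ∉ s) :
    PySem.Set.discard s x = s := by
  unfold PySem.Set.discard
  apply List.filter_eq_self.mpr
  intro y hy
  simp only [Bool.not_eq_eq_eq_not, Bool.not_true, beq_eq_false_iff_ne]
  rintro rfl; exact h hy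

theorem discard_of_all_eq {x : Int} {s : List Int} (h : ∀ a ∈ s, a = x) :
    PySem.Set.discard s x = [] := by
  unfold PySem.Set.discard
  apply List.filter_eq_nil_iff.mpr
  intro y hy
  simp [h y hy]

theorem add_cons_of_ne {x y : Int} {s : List Int} (h : y ≠ x) :
    PySem.Set.add (x :: s) y = x :: PySem.Set.add s y := by
  unfold PySem.Set.add PySem.Set.contains
  simp only [List.contains_cons, show (y == x) = false from beq_eq_false_iff_ne.mpr h,
    Bool.false_or]
  split_ifs <;> rfl

theorem update_cons_of_not_mem {x : Int} {ys : List Int} (h : x ∉ ys) :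
    ∀ s : List Int, PySem.Set.update (x :: s) ys = x :: PySem.Set.update s ys := by
  induction ys with
  | nil => intro s; simp [PySem.Set.update]
  | cons y ys ih =>
      intro s
      have hyx : y ≠ x := by rintro rfl; exact h (List.mem_cons_self)
      rw [PySem.Set.update_cons, PySem.Set.update_cons, add_cons_of_ne hyx,
        ih (by intro hm; exact h (List.mem_cons_of_mem _ hm))]

theorem ofList_all_eq {x : Int} {r : List Int} (hne : r ≠ []) (h : ∀ a ∈ r, a = x) :
    PySem.Set.ofList r = [x] := by
  cases r with
  | nil => exact absurd rfl hne
  | cons a r' =>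
      have hax : a = x := h a List.mem_cons_self
      subst hax
      rw [PySem.Set.ofList_cons, discard_of_all_eq (fun b hb => h b (by
        simpa using Or.inr ((PySem.Set.mem_ofList _ _).mp hb)))]

-- x does not recur after its leading run in a sorted list
theorem not_mem_dropWhile_sorted {x : Int} {t : List Int}
    (h : List.Pairwise (· ≤ ·) (x :: t)) : x ∉ t.dropWhile (· = x) := by
  induction t with
  | nil => simp
  | cons a t' ih =>
      by_cases hax : a = x
      · subst hax
        rw [List.dropWhile_cons]
        simp only [decide_true, if_true]
        exact ih (by
          have := h.sublist (List.Sublist.cons₂ a (List.sublist_cons_self a t'))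
          exact this)
      · rw [List.dropWhile_cons]
        rw [if_neg (by simp [hax])]
        intro hm
        rcases List.mem_cons.mp hm with rfl | hm'
        · exact hax rfl
        · -- x ≤ a (head rel) and a ≤ x (a before x in pairwise tail): so a = x
          have hxa : x ≤ a := (List.pairwise_cons.mp h).1 a List.mem_cons_self
          have haxle : a ≤ x :=
            (List.pairwise_cons.mp (List.pairwise_cons.mp h).2).1 x hm'
          exact hax (le_antisymm haxle hxa)

-- on a nondecreasing list, RLE yields each distinct value with its multiplicity
theorem rleSpan_sorted (s : List Int) (hs : List.Pairwise (· ≤ ·) s) :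
    rleSpan s = (PySem.Set.ofList s).map (fun k => (k, (s.count k : Int))) := by
  induction s using rleSpan.induct with
  | case1 => simp [rleSpan]
  | case2 x t ih =>
      set r := t.takeWhile (· = x) with hr
      set d := t.dropWhile (· = x) with hd
      have htrd : r ++ d = t := List.takeWhile_append_dropWhile
      have hrall : ∀ a ∈ r, a = x := by
        intro a ha; simpa using List.mem_takeWhile_imp ha
      have hxd : x ∉ d := not_mem_dropWhile_sorted hs
      have hdsorted : List.Pairwise (· ≤ ·) d :=
        List.Pairwise.sublist ((List.dropWhile_sublist _).trans (List.sublist_cons_self x t)) hs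
      -- the set of x :: t is x followed by the set of d
      have hset : PySem.Set.ofList (x :: t) = x :: PySem.Set.ofList d := by
        rw [PySem.Set.ofList_cons]
        congr 1
        rw [← htrd, PySem.Set.ofList_append]
        have hxofd : x ∉ PySem.Set.ofList d := by
          intro hm; exact hxd ((PySem.Set.mem_ofList _ _).mp hm)
        by_cases hrnil : r = []
        · rw [hrnil, PySem.Set.ofList_nil,
            show PySem.Set.update ([] : List Int) d = PySem.Set.ofList d from rfl]
          exact discard_of_not_mem hxofd
        · rw [ofList_all_eq hrnil hrall, update_cons_of_not_mem hxd,
            show PySem.Set.update ([] : List Int) d = PySem.Set.ofList d from rfl]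
          unfold PySem.Set.discard
          rw [List.filter_cons]
          simp only [BEq.rfl, Bool.not_true, Bool.false_eq_true, if_false]
          exact discard_of_not_mem hxofd
      -- counts
      have hcx : ((x :: t).count x : Int) = 1 + (r.length : Int) := by
        rw [← htrd, List.count_cons, List.count_append]
        have h1 : r.count x = r.length :=
          List.count_eq_length.mpr (fun a ha => by simp [hrall a ha])
        have h2 : d.count x = 0 := List.count_eq_zero.mpr hxd
        simp only [h1, h2, beq_self_eq_true, if_true, Nat.add_zero]
        push_cast
        ring
      have hck : ∀ k ∈ PySem.Set.ofList d, ((x :: t).count k : Int) = (d.count k : Int) := by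
        intro k hk
        have hkd : k ∈ d := (PySem.Set.mem_ofList _ _).mp hk
        have hkx : k ≠ x := by rintro rfl; exact hxd hkd
        rw [← htrd, List.count_cons, List.count_append]
        have h1 : r.count k = 0 := List.count_eq_zero.mpr (by
          intro hm; exact hkx (hrall k hm))
        simp [h1, Ne.symm hkx]
      rw [rleSpan_cons, hset, List.map_cons, ← hd, ih hdsorted]
      refine congrArg₂ _ ?_ ?_
      · rw [hcx]
      · exact (List.map_congr_left (fun k hk => by rw [hck k hk])).symm

-- B's whole counting loop (including the final flush) is the RLE of its sorted input
theorem finish_foldl_bStep (s : List Int) (hs : List.Pairwise (· ≤ ·) s) :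
    (let st := s.foldl bStep ([], 0, 0)
     if st.2.2 > 0 then st.1 ++ [(st.2.1, st.2.2)] else st.1)
    = (PySem.Set.ofList s).map (fun k => (k, (s.count k : Int))) := by
  cases s with
  | nil => simp
  | cons x t =>
      have h0 : bStep (([] : List (Int × Int)), (0:Int), (0:Int)) x = ([], x, 1) := by
        simp [bStep]
      have hfold := foldl_bStep_eq_rleSpan t [] x 1 (by omega)
      simp only [List.foldl_cons, h0]
      rw [hfold]
      rw [show ([] : List (Int × Int)) ++ (x, 1 + ((t.takeWhile (· = x)).length : Int))
            :: rleSpan (t.dropWhile (· = x)) = rleSpan (x :: t) from by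
          rw [rleSpan_cons]; simp]
      exact rleSpan_sorted _ hs

-- sorted2 with keys (p.2, p.1) is sorted with the lexicographic key
theorem sorted2_eq_sorted_lex (xs : List (Int × Int)) :
    PySem.List.sorted2 xs (fun p => p.2) (fun p => p.1) false
      = PySem.List.sorted xs (fun p => toLex (p.2, p.1)) false := by
  unfold PySem.List.sorted2 PySem.List.sorted
  simp only [if_neg (by decide : ¬ (false = true))]
  congr 1
  funext acc p
  congr 1
  funext a b
  rw [show (decide (a.2 < b.2) || !decide (b.2 < a.2) && decide (a.1 < b.1))
        = decide (a.2 < b.2 ∨ (¬ b.2 < a.2 ∧ a.1 < b.1)) from by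
      by_cases h1 : a.2 < b.2 <;> by_cases h2 : b.2 < a.2 <;> by_cases h3 : a.1 < b.1 <;>
        simp [h1, h2, h3]]
  rw [decide_eq_decide]
  rw [Prod.Lex.toLex_lt_toLex]
  omega

theorem lexKey_injective : Function.Injective (fun p : Int × Int => toLex (p.2, p.1)) := by
  intro p q h
  have := toLex.injective h
  cases p; cases q
  simp_all [Prod.ext_iff]

-- ===== VERDICT (by name: the statement is the Claim_ definition above) =====
theorem calculate_spec : Claim_equal_calculate := by
  intro nums _
  unfold Spec_calculate calculate calculate_alt
  dsimp only
  -- name the two (value, count) pair lists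
  set s := PySem.List.sorted nums (fun x => x) false with hsdef
  have hsperm : s.Perm nums := PySem.List.sorted_perm nums (fun x => x) false
  have hssorted : List.Pairwise (· ≤ ·) s := by
    exact PySem.List.sorted_pairwise nums (fun x => x)
  -- A's dict items
  have hitems :
      ((PySem.Set.ofList nums).foldl
        (fun d num => d.insert num ((PySem.List.count nums num : Int))) PySem.Dict.empty).items
      = (PySem.Set.ofList nums).map (fun k => (k, (PySem.List.count nums k : Int))) := by
    have := PySem.Dict.items_foldl_insert_fresh (PySem.Set.ofList nums)
      (fun k => k) (fun k => ((PySem.List.count nums k : Int))) PySem.Dict.empty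
      (fun a _ => PySem.Dict.contains_empty a)
      (by simp [PySem.Set.nodup_ofList nums])
    simpa using this
  -- B's pairs list is the RLE of s
  have hpairs := finish_foldl_bStep s hssorted
  rw [hitems, hpairs]
  -- the two pair lists are permutations of each other; the lex sort equalizes them
  have hmapeq : (PySem.Set.ofList s).map (fun k => (k, (s.count k : Int)))
      = (PySem.Set.ofList s).map (fun k => (k, (PySem.List.count nums k : Int))) := by
    apply List.map_congr_left
    intro k _
    simp [PySem.List.count_eq, hsperm.count_eq k]
  have hsetperm : (PySem.Set.ofList s).Perm (PySem.Set.ofList nums) := by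
    rw [List.perm_ext_iff_of_nodup (PySem.Set.nodup_ofList s) (PySem.Set.nodup_ofList nums)]
    intro a
    rw [PySem.Set.mem_ofList, PySem.Set.mem_ofList]
    exact hsperm.mem_iff
  have hperm : ((PySem.Set.ofList s).map (fun k => (k, (s.count k : Int)))).Perm
      ((PySem.Set.ofList nums).map (fun k => (k, (PySem.List.count nums k : Int)))) := by
    rw [hmapeq]
    exact hsetperm.map _
  rw [sorted2_eq_sorted_lex, sorted2_eq_sorted_lex,
    PySem.List.sorted_eq_sorted_of_perm _ _ _ lexKey_injective hperm]
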